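-- pv_equiv track=rewrite | github.com/ramirososa/oblig_embebidos | oblig_raspiC/Obligatorio/venv/ProbandoLeer.py | cortarlinea
-- ===== SOURCE A (Python) =====
-- def cortarlinea(l):
--     i=0
--     arr=['','','']
--     while l[i]!=' ':
--         i=i+1
--     i=i+1
--     while l[i]!=' ':
--         i=i+1
--     arr[0]=l[0:i]
--     aux = i+1
--     i=i+1
--     while l[i]!=' ':
--         i=i+1
--     arr[1]=l[aux:i]
--     aux = i+1
--     arr[2]=l[aux:len(l)]
--     return arr
-- ===== SOURCE B (Python) =====
-- def cortarlinea(l):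
--     # split-once helper applied three times to successively shorter strings;
--     # the first two fields are rejoined because A keeps them together in arr[0].
--     # cut raises ValueError (via str.index) when no space remains, where A
--     # raises IndexError — both outside Pre_ (fewer than three spaces).
--     def cut(s):
--         j = s.index(' ')
--         return s[:j], s[j+1:]
--     first, rest = cut(l)
--     second, rest = cut(rest)
--     third, rest = cut(rest)
--     return [first + ' ' + second, third, rest]
-- ===== Notes on version B (the rewrite author's own statement) =====
-- stated objective: idiomatic
-- what changed: Replaces A's three inline scanning while-loops over absolute indices by a reusable cut-at-first-space helper (str.index plus slicing) applied three times to successively shorter strings, rejoining the first two fields; Pre_ excludes strings with fewer than three spaces, on which both raise (A IndexError, B ValueError).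
import Mathlib
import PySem

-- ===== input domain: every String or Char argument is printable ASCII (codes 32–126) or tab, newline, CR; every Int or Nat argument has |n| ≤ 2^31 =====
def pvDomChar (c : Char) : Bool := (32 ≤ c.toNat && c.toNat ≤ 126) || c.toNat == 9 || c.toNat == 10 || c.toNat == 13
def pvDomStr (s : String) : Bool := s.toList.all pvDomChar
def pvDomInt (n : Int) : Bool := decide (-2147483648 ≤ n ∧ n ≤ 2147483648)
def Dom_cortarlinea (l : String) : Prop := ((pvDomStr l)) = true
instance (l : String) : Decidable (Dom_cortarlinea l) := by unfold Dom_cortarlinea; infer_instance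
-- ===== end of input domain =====

-- B replaces A's three inline scanning while-loops by a reusable cut-at-first-space
-- helper (str.index + slicing) applied three times to shrinking suffixes, rejoining
-- the first two fields (idiomatic rewrite, same cost).

-- ===== PORT A =====
-- A's 'while l[i] != ' ': i = i + 1' loop: advance i until a space is found.
-- When no space remains Python raises IndexError (excluded by Pre_); the port then
-- returns cs.length (an unused value on admitted inputs).
def pvFindSp (cs : List Char) (i : Nat) : Nat :=
  if h : i < cs.length then
    if cs[i] = ' ' then i else pvFindSp cs (i + 1)
  else i
termination_by cs.length - i

-- Slices l[0:i], l[aux:i], l[aux:len(l)] have nonnegative in-order bounds, where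
-- Python's slice is exactly (drop a).take (b - a).
def cortarlinea (l : String) : List String :=
  let cs := l.toList
  let i₁ := pvFindSp cs 0
  let i₂ := pvFindSp cs (i₁ + 1)
  let arr0 := String.ofList ((cs.drop 0).take (i₂ - 0))      -- arr[0] = l[0:i]
  let aux := i₂ + 1
  let i₃ := pvFindSp cs (i₂ + 1)
  let arr1 := String.ofList ((cs.drop aux).take (i₃ - aux))   -- arr[1] = l[aux:i]
  let arr2 := String.ofList ((cs.drop (i₃ + 1)).take (cs.length - (i₃ + 1)))  -- arr[2] = l[aux:len(l)]
  [arr0, arr1, arr2]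

-- ===== PORT B =====
-- B's cut(s): j = s.index(' '); return s[:j], s[j+1:]. A missing space is Python's
-- ValueError (excluded by Pre_); the port then returns (cs, []) (unused on admitted inputs).
def pvCut (cs : List Char) : List Char × List Char :=
  match PySem.List.index? cs ' ' with
  | some j => (cs.take j, cs.drop (j + 1))
  | none => (cs, [])

def cortarlinea_alt (l : String) : List String :=
  let c1 := pvCut l.toList      -- first, rest = cut(l)
  let c2 := pvCut c1.2          -- second, rest = cut(rest)
  let c3 := pvCut c2.2          -- third, rest = cut(rest)
  [String.ofList (c1.1 ++ ' ' :: c2.1), String.ofList c3.1, String.ofList c3.2]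

-- ===== PRECONDITION & SPEC =====
-- Python A raises IndexError when the string has fewer than three spaces; Pre_ admits
-- exactly the strings with at least three spaces.
def Pre_cortarlinea (l : String) : Prop := 3 ≤ l.toList.count ' '
instance (l : String) : Decidable (Pre_cortarlinea l) := by unfold Pre_cortarlinea; infer_instance

def pvWitness_cortarlinea : String := "12:30 25.1 64.2 ok"

def Spec_cortarlinea (l : String) (out : List String) : Prop := out = cortarlinea_alt l
instance (l : String) (out : List String) : Decidable (Spec_cortarlinea l out) := by unfold Spec_cortarlinea; infer_instance

-- ===== CLAIM (what is proved, stated in full; the proofs are below) =====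
def Claim_equal_cortarlinea : Prop := ∀ (l : String), Dom_cortarlinea l → Pre_cortarlinea l → Spec_cortarlinea l (cortarlinea l)

-- ===== LEMMAS AND PROOFS =====

theorem pvFindSp_ge (cs : List Char) (i : Nat) : i ≤ pvFindSp cs i := by
  induction i using pvFindSp.induct cs with
  | case1 i h hc => rw [pvFindSp, dif_pos h, if_pos hc]
  | case2 i h hc ih => rw [pvFindSp, dif_pos h, if_neg hc]; omega
  | case3 i h => rw [pvFindSp, dif_neg h]

-- pvFindSp finds the first space at position ≥ i: it is a space, in range, and one
-- space is consumed from the suffix count.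
theorem pvFindSp_spec (cs : List Char) (i : Nat)
    (hsp : 0 < (cs.drop i).count ' ') :
    pvFindSp cs i < cs.length ∧ cs[pvFindSp cs i]? = some ' ' ∧
      (cs.drop (pvFindSp cs i + 1)).count ' ' + 1 = (cs.drop i).count ' ' := by
  induction i using pvFindSp.induct cs with
  | case1 i h hc =>
    rw [pvFindSp, dif_pos h, if_pos hc]
    refine ⟨h, by simp [List.getElem?_eq_getElem h, hc], ?_⟩
    rw [List.drop_eq_getElem_cons h]
    simp [hc]
  | case2 i h hc ih =>
    rw [pvFindSp, dif_pos h, if_neg hc]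
    have hdrop : (cs.drop i).count ' ' = (cs.drop (i+1)).count ' ' := by
      rw [List.drop_eq_getElem_cons h, List.count_cons]
      have hbe : (cs[i] == ' ') = false := beq_eq_false_iff_ne.mpr hc
      simp [hbe]
    exact hdrop ▸ ih (by omega)
  | case3 i h =>
    exfalso
    rw [List.drop_eq_nil_of_le (by omega)] at hsp
    simp at hsp

-- index of the first space in the suffix cs.drop i, expressed through pvFindSp.
theorem pvIdx_drop (cs : List Char) (i : Nat)
    (hsp : 0 < (cs.drop i).count ' ') :
    PySem.List.index? (cs.drop i) ' ' = some (pvFindSp cs i - i) := by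
  induction i using pvFindSp.induct cs with
  | case1 i h hc =>
    rw [pvFindSp, dif_pos h, if_pos hc, List.drop_eq_getElem_cons h, hc,
      PySem.List.index?_cons_self]
    simp
  | case2 i h hc ih =>
    rw [pvFindSp, dif_pos h, if_neg hc]
    have hdrop : (cs.drop i).count ' ' = (cs.drop (i+1)).count ' ' := by
      rw [List.drop_eq_getElem_cons h, List.count_cons]
      have hbe : (cs[i] == ' ') = false := beq_eq_false_iff_ne.mpr hc
      simp [hbe]
    have ih' := ih (hdrop ▸ hsp)
    have hge : i + 1 ≤ pvFindSp cs (i + 1) := pvFindSp_ge cs (i + 1)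
    rw [List.drop_eq_getElem_cons h, PySem.List.index?_cons_of_ne _ hc, ih']
    simp only [Option.map_some]
    congr 1
    omega
  | case3 i h =>
    exfalso
    rw [List.drop_eq_nil_of_le (by omega)] at hsp
    simp at hsp

-- cut on the suffix cs.drop i: the part before the first space is take (pvFindSp - i)
-- and the part after it is cs.drop (pvFindSp + 1).
theorem pvCut_drop (cs : List Char) (i : Nat)
    (hsp : 0 < (cs.drop i).count ' ') :
    pvCut (cs.drop i) = ((cs.drop i).take (pvFindSp cs i - i), cs.drop (pvFindSp cs i + 1)) := by
  unfold pvCut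
  rw [pvIdx_drop cs i hsp]
  dsimp only
  have hge : i ≤ pvFindSp cs i := pvFindSp_ge cs i
  rw [List.drop_drop, show i + (pvFindSp cs i - i + 1) = pvFindSp cs i + 1 by omega]

-- ===== VERDICT (by name: the statement is the Claim_ definition above) =====
theorem cortarlinea_spec : Claim_equal_cortarlinea := by
  intro l _hdom hpre
  unfold Spec_cortarlinea cortarlinea cortarlinea_alt
  dsimp only
  have hc3 : 3 ≤ l.toList.count ' ' := hpre
  have h0 : 0 < (l.toList.drop 0).count ' ' := by
    simpa using (by omega : (0:Nat) < l.toList.count ' ')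
  have s1 := pvFindSp_spec l.toList 0 h0
  have e1 : (l.toList.drop (pvFindSp l.toList 0 + 1)).count ' ' + 1 = l.toList.count ' ' := by
    simpa using s1.2.2
  have h1 : 0 < (l.toList.drop (pvFindSp l.toList 0 + 1)).count ' ' := by omega
  have s2 := pvFindSp_spec l.toList (pvFindSp l.toList 0 + 1) h1
  have e2 := s2.2.2
  have h2 : 0 < (l.toList.drop (pvFindSp l.toList (pvFindSp l.toList 0 + 1) + 1)).count ' ' := by
    omega
  have P1 : pvCut (l.toList.drop 0) =
      (l.toList.take (pvFindSp l.toList 0 - 0), l.toList.drop (pvFindSp l.toList 0 + 1)) := by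
    simpa using pvCut_drop l.toList 0 h0
  have P2 := pvCut_drop l.toList (pvFindSp l.toList 0 + 1) h1
  have P3 := pvCut_drop l.toList (pvFindSp l.toList (pvFindSp l.toList 0 + 1) + 1) h2
  rw [show pvCut l.toList = pvCut (l.toList.drop 0) by simp, P1]
  dsimp only
  rw [P2]
  dsimp only
  rw [P3]
  dsimp only
  have hge1 : pvFindSp l.toList 0 + 1 ≤ pvFindSp l.toList (pvFindSp l.toList 0 + 1) :=
    pvFindSp_ge l.toList (pvFindSp l.toList 0 + 1)
  have hsp1 : l.toList[pvFindSp l.toList 0]? = some ' ' := s1.2.1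
  -- arr[0]: l[:p2] is l[:p1] ++ ' ' ++ l[p1+1:p2] because position p1 holds a space
  have harr0 : l.toList.take (pvFindSp l.toList (pvFindSp l.toList 0 + 1)) =
      l.toList.take (pvFindSp l.toList 0 - 0) ++
        ' ' :: (l.toList.drop (pvFindSp l.toList 0 + 1)).take
          (pvFindSp l.toList (pvFindSp l.toList 0 + 1) - (pvFindSp l.toList 0 + 1)) := by
    conv_lhs => rw [show pvFindSp l.toList (pvFindSp l.toList 0 + 1) =
      (pvFindSp l.toList 0 + 1) +
        (pvFindSp l.toList (pvFindSp l.toList 0 + 1) - (pvFindSp l.toList 0 + 1)) by omega]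
    rw [List.take_add, List.take_add_one, hsp1]
    simp
  have harr2 : (l.toList.drop (pvFindSp l.toList (pvFindSp l.toList (pvFindSp l.toList 0 + 1) + 1) + 1)).take
      (l.toList.length - (pvFindSp l.toList (pvFindSp l.toList (pvFindSp l.toList 0 + 1) + 1) + 1)) =
      l.toList.drop (pvFindSp l.toList (pvFindSp l.toList (pvFindSp l.toList 0 + 1) + 1) + 1) := by
    apply List.take_of_length_le; simp
  rw [← harr0, harr2]
  simp
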